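-- pv_equiv track=rewrite | github.com/Tjnuzza/Python-stuff | Individual-scripts/StatArrayAverageCalculation.py | ScoreProcess
-- ===== SOURCE A (Python) =====
-- def ScoreProcess(arr):#Drop lowest die, add the rest, return the sum
--     LowRoll = 0
--
--     for i in range(1,4):#Find lowest die
--         if arr[i] < arr[LowRoll]:
--             LowRoll = i
--     RollTotal = 0
--
--     for i in range(4):#Take sum of three best dice
--         RollTotal += arr[i]
--     AbScr = RollTotal-arr[LowRoll]
--     return AbScr
-- ===== SOURCE B (Python) =====
-- def ScoreProcess(arr):  # sort the four dice, drop the smallest, sum the rest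
--     vals = [arr[i] for i in range(4)]
--     s = sorted(vals)
--     return s[1] + s[2] + s[3]
-- ===== Notes on version B (the rewrite author's own statement) =====
-- stated objective: idiomatic
-- what changed: Replaces the scan-for-lowest-index plus total-minus-lowest with sorting the four dice and summing the three largest.
import Mathlib
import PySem

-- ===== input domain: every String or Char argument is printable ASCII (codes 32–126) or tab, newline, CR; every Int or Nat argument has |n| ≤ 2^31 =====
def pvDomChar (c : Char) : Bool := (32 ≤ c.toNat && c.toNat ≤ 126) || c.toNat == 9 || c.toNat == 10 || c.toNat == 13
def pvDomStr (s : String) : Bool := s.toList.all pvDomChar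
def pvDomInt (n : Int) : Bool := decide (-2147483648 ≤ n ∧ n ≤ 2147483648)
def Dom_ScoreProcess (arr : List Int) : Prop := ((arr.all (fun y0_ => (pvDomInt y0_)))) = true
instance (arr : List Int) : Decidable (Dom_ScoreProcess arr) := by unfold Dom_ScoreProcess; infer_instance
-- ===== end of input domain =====

-- B sorts the four dice and sums the three largest instead of A's scan-for-lowest-index then total-minus-lowest (idiomatic rewrite, same cost).


-- ===== PORT A =====
-- literal transliteration: find the index of the lowest die, sum all four, subtract the lowest
def ScoreProcess (arr : List Int) : Int :=
  let lowRoll : Int :=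
    (PySem.List.pyRange 1 4 1).foldl
      (fun lowRoll i =>
        if PySem.List.pyGetD arr i 0 < PySem.List.pyGetD arr lowRoll 0 then i else lowRoll) 0
  let rollTotal : Int :=
    (PySem.List.pyRange 0 4 1).foldl (fun acc i => acc + PySem.List.pyGetD arr i 0) 0
  rollTotal - PySem.List.pyGetD arr lowRoll 0

-- ===== PORT B =====
-- literal transliteration of Source B: take the first four values, sort, sum the top three
def ScoreProcess_alt (arr : List Int) : Int :=
  let vals := (PySem.List.pyRange 0 4 1).map (fun i => PySem.List.pyGetD arr i 0)
  let s := PySem.List.sorted vals (fun x => x) false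
  PySem.List.pyGetD s 1 0 + PySem.List.pyGetD s 2 0 + PySem.List.pyGetD s 3 0

-- ===== PRECONDITION & SPEC =====
-- A indexes arr[0..3]; lists shorter than 4 raise IndexError, so they are excluded.
def Pre_ScoreProcess (arr : List Int) : Prop := 4 ≤ arr.length
instance (arr : List Int) : Decidable (Pre_ScoreProcess arr) := by unfold Pre_ScoreProcess; infer_instance
def pvWitness_ScoreProcess : List Int := [3, 1, 4, 1]

def Spec_ScoreProcess (arr : List Int) (out : Int) : Prop := out = ScoreProcess_alt arr
instance (arr : List Int) (out : Int) : Decidable (Spec_ScoreProcess arr out) := by unfold Spec_ScoreProcess; infer_instance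

-- ===== CLAIM (what is proved, stated in full; the proofs are below) =====
def Claim_equal_ScoreProcess : Prop := ∀ (arr : List Int), Dom_ScoreProcess arr → Pre_ScoreProcess arr → Spec_ScoreProcess arr (ScoreProcess arr)

-- ===== LEMMAS AND PROOFS =====

-- B on an explicit 4+-element list equals total minus some m that is the minimum of the four
theorem ScoreProcess_alt_eq_total_sub_min (a b c d : Int) (t : List Int) :
    ∃ m, ScoreProcess_alt (a::b::c::d::t) = a+b+c+d - m ∧ (m=a ∨ m=b ∨ m=c ∨ m=d)
      ∧ m ≤ a ∧ m ≤ b ∧ m ≤ c ∧ m ≤ d := by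
  have hvals : (PySem.List.pyRange 0 4 1).map
      (fun i => PySem.List.pyGetD (a::b::c::d::t) i 0) = [a,b,c,d] := by
    simp [PySem.List.pyRange, List.range_succ, PySem.List.pyGetD, PySem.List.pyGet?,
      PySem.List.pyIdx?]
    refine ⟨?_, ?_, ?_, ?_⟩ <;> rw [if_pos (by omega)] <;> simp
  have hlen : (PySem.List.sorted [a,b,c,d] (fun x => x) false).length = 4 := by
    simpa using (PySem.List.sorted_perm ([a,b,c,d]) (fun x : Int => x) false).length_eq
  obtain ⟨m, x, y, z, hm⟩ : ∃ m x y z,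
      PySem.List.sorted [a,b,c,d] (fun x => x) false = [m,x,y,z] := by
    match h : PySem.List.sorted [a,b,c,d] (fun x : Int => x) false, hlen with
    | [m,x,y,z], _ => exact ⟨m,x,y,z, rfl⟩
  have hperm : ([m,x,y,z] : List Int).Perm [a,b,c,d] :=
    hm ▸ PySem.List.sorted_perm _ _ _
  have hsum : m + x + y + z = a + b + c + d := by
    have := hperm.sum_eq; simp at this; linarith
  have hle := PySem.List.key_head_sorted_le (xs := [a,b,c,d]) (key := fun x : Int => x)
      (m := m) (t := [x,y,z]) hm
  refine ⟨m, ?_, ?_, by simpa using hle a (by simp), by simpa using hle b (by simp),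
    by simpa using hle c (by simp), by simpa using hle d (by simp)⟩
  · simp only [ScoreProcess_alt, hvals, hm]
    norm_num [PySem.List.pyGetD, PySem.List.pyGet?, PySem.List.pyIdx?,
      show Int.toNat 2 = 2 from rfl, show Int.toNat 3 = 3 from rfl,
      List.getElem_cons_succ, List.getElem_cons_zero]
    linarith
  · have : m ∈ ([a,b,c,d] : List Int) := hperm.mem_iff.mp (by simp)
    simpa using this

-- A on an explicit 4+-element list equals total minus some p that is the minimum of the four
theorem ScoreProcess_eq_total_sub_min (a b c d : Int) (t : List Int) :
    ∃ p, ScoreProcess (a::b::c::d::t) = a+b+c+d - p ∧ (p=a ∨ p=b ∨ p=c ∨ p=d)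
      ∧ p ≤ a ∧ p ≤ b ∧ p ≤ c ∧ p ≤ d := by
  have hr1 : PySem.List.pyRange 1 4 1 = [1,2,3] := by decide
  have hr0 : PySem.List.pyRange 0 4 1 = [0,1,2,3] := by decide
  have g0 : PySem.List.pyGetD (a::b::c::d::t) 0 0 = a := by
    simp [PySem.List.pyGetD, PySem.List.pyGet?, PySem.List.pyIdx?]
    rw [if_pos (by omega)]; simp
  have g1 : PySem.List.pyGetD (a::b::c::d::t) 1 0 = b := by
    simp [PySem.List.pyGetD, PySem.List.pyGet?, PySem.List.pyIdx?]
    rw [if_pos (by omega)]; simp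
  have g2 : PySem.List.pyGetD (a::b::c::d::t) 2 0 = c := by
    simp [PySem.List.pyGetD, PySem.List.pyGet?, PySem.List.pyIdx?]
    rw [if_pos (by omega)]; simp [show Int.toNat 2 = 2 from rfl]
  have g3 : PySem.List.pyGetD (a::b::c::d::t) 3 0 = d := by
    simp [PySem.List.pyGetD, PySem.List.pyGet?, PySem.List.pyIdx?]
    rw [if_pos (by omega)]; simp [show Int.toNat 3 = 3 from rfl]
  simp only [ScoreProcess, hr1, hr0, List.foldl, g0, g1, g2, g3]
  by_cases h1 : b < a <;>
    simp only [h1, if_true, if_false, g0, g1, g2, g3] <;>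
  [skip; skip] <;>
  · split_ifs <;> simp_all <;> (try split_ifs) <;> (try simp_all) <;>
      first
        | omega
        | exact ⟨a, by omega, by simp, by omega, by omega, by omega, by omega⟩
        | exact ⟨b, by omega, by simp, by omega, by omega, by omega, by omega⟩
        | exact ⟨c, by omega, by simp, by omega, by omega, by omega, by omega⟩
        | exact ⟨d, by omega, by simp, by omega, by omega, by omega, by omega⟩

-- ===== VERDICT (by name: the statement is the Claim_ definition above) =====
theorem ScoreProcess_spec : Claim_equal_ScoreProcess := by
  intro arr _ hpre
  unfold Pre_ScoreProcess at hpre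
  match arr, hpre with
  | a :: b :: c :: d :: t, _ =>
    show ScoreProcess _ = ScoreProcess_alt _
    obtain ⟨p, hA, hmA, a1, a2, a3, a4⟩ := ScoreProcess_eq_total_sub_min a b c d t
    obtain ⟨m, hB, hmB, b1, b2, b3, b4⟩ := ScoreProcess_alt_eq_total_sub_min a b c d t
    rw [hA, hB]
    rcases hmA with rfl | rfl | rfl | rfl <;> rcases hmB with rfl | rfl | rfl | rfl <;> omega
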